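/- GENERATED by farm/mkstatement.py — do not edit. EVERY unit statement of the proof farm, imported together: this module
   compiles iff every statement compiles and no two units define the same name (5 units, one namespace each). -/
import Toyh.Spec.Units.run_ctors
import Toyh.Spec.Units.prog_main
import Toyh.Spec.Units.clamp_length
import Toyh.Spec.Units.sub_I_65535_1
import Toyh.Spec.Units.start
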